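-- pv_equiv track=rewrite | github.com/Netocool2006/Motor-Fusion | core/token_budget.py | compress_similar_entries
-- ===== SOURCE A (Python) =====
-- def compress_similar_entries(entries: list[str], threshold: float = 0.8) -> list[str]:
--     """Comprime entradas similares en resúmenes."""
--     if len(entries) <= 3:
--         return entries
--
--     # Agrupar por similitud simple (primeras N palabras)
--     groups = {}
--     for entry in entries:
--         key = " ".join(entry.split()[:5]).lower()
--         if key not in groups:
--             groups[key] = []
--         groups[key].append(entry)
--
--     compressed = []
--     for key, group in groups.items():
--         if len(group) == 1:
--             compressed.append(group[0])
--         else: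
--             compressed.append(f"{group[0]} (+{len(group)-1} similares)")
--
--     return compressed
-- ===== SOURCE B (Python) =====
-- def compress_similar_entries(entries: list[str], threshold: float = 0.8) -> list[str]:
--     """Comprime entradas similares en resúmenes."""
--     if len(entries) <= 3:
--         return entries
--
--     counts = {}
--     for entry in entries:
--         key = " ".join(entry.split()[:5]).lower()
--         counts[key] = counts.get(key, 0) + 1
--
--     out = []
--     seen = set()
--     for entry in entries:
--         key = " ".join(entry.split()[:5]).lower()
--         if key not in seen:
--             seen.add(key)
--             c = counts[key]
--             out.append(entry if c == 1 else f"{entry} (+{c-1} similares)")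
--     return out
-- ===== Notes on version B (the rewrite author's own statement) =====
-- stated objective: alternative
-- what changed: Replaces the dict-of-group-lists accumulation plus items() pass with a count table built in one pass and a second pass over the entries guarded by a seen-set, so no per-key entry lists are ever materialized.
import Mathlib
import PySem

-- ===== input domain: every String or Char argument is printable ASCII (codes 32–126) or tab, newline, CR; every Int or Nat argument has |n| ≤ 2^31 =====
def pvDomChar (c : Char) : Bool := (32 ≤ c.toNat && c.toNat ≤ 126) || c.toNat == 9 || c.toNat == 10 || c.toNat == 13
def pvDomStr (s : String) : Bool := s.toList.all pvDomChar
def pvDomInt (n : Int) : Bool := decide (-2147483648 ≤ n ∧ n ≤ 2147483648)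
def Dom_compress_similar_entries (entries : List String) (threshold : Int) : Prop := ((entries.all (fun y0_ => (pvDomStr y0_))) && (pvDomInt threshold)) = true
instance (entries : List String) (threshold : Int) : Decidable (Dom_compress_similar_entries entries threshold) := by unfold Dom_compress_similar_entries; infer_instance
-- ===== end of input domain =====

-- B replaces A's dict-of-group-lists plus items() pass by a count table and a seen-set second
-- pass over the entries (alternative decomposition; same asymptotic cost).

-- key = " ".join(entry.split()[:5]).lower()   (identical expression in both Pythons)
def pvKeyOf (entry : String) : String :=
  PySem.Str.lower (PySem.Str.join " " (PySem.List.slice (PySem.Str.split₀ entry) none (some 5)))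

-- ===== PORT A =====
def compress_similar_entries (entries : List String) (threshold : Int) : List String :=
  if entries.length ≤ 3 then entries
  else
    let groups : PySem.Dict String (List String) :=
      entries.foldl (fun d entry =>
        let k := pvKeyOf entry
        let d' := if d.contains k then d else d.insert k ([] : List String)
        d'.modify k [] (fun g => g ++ [entry])) PySem.Dict.empty
    -- group[0]: the group list is nonempty by construction, so List.getD 0 "" is exact here
    groups.items.foldl (fun acc kg =>
      if kg.2.length = 1 then acc ++ [kg.2.getD 0 ""]
      else acc ++ [kg.2.getD 0 "" ++ " (+" ++ PySem.Int.toStr ((kg.2.length : Int) - 1) ++ " similares)"]) []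

-- ===== PORT B =====
def compress_similar_entries_alt (entries : List String) (threshold : Int) : List String :=
  if entries.length ≤ 3 then entries
  else
    let counts : PySem.Dict String Int :=
      entries.foldl (fun d entry =>
        let k := pvKeyOf entry
        d.insert k (d.getD k 0 + 1)) PySem.Dict.empty
    -- counts[key]: the key is always present at this point, so getD 0 is exact here
    (entries.foldl (fun st entry =>
        let k := pvKeyOf entry
        if PySem.Set.contains st.2 k then st
        else
          let c := counts.getD k 0
          (st.1 ++ [if c = 1 then entry
                    else entry ++ " (+" ++ PySem.Int.toStr (c - 1) ++ " similares)"],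
           PySem.Set.add st.2 k)) (([] : List String), PySem.Set.empty)).1

-- ===== PRECONDITION & SPEC =====
def Spec_compress_similar_entries (entries : List String) (threshold : Int) (out : List String) : Prop := out = compress_similar_entries_alt entries threshold
instance (entries : List String) (threshold : Int) (out : List String) : Decidable (Spec_compress_similar_entries entries threshold out) := by unfold Spec_compress_similar_entries; infer_instance

-- ===== CLAIM (what is proved, stated in full; the proofs are below) =====
def Claim_equal_compress_similar_entries : Prop := ∀ (entries : List String) (threshold : Int), Dom_compress_similar_entries entries threshold → Spec_compress_similar_entries entries threshold (compress_similar_entries entries threshold)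

-- ===== LEMMAS AND PROOFS =====

-- A's per-group rendering of (key, group)
def pvRender (kg : String × List String) : String :=
  if kg.2.length = 1 then kg.2.getD 0 ""
  else kg.2.getD 0 "" ++ " (+" ++ PySem.Int.toStr ((kg.2.length : Int) - 1) ++ " similares)"

-- the output line for key k, expressed over the whole input list
def pvOut (all : List String) (k : String) : String :=
  pvRender (k, all.filter (fun e => pvKeyOf e == k))

-- first-occurrence keys of l not already in seen
def pvFresh : List String → List String → List String
  | [], _ => []
  | e :: l, seen =>
    if pvKeyOf e ∈ seen then pvFresh l seen
    else pvKeyOf e :: pvFresh l (seen ++ [pvKeyOf e])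

lemma pvSet_contains_iff {s : PySem.Set String} {k : String} :
    PySem.Set.contains s k = true ↔ k ∈ s := by
  simp [PySem.Set.contains]

lemma pvSet_add_of_mem {s : PySem.Set String} {k : String} (h : k ∈ s) :
    PySem.Set.add s k = s := by
  simp only [PySem.Set.add, pvSet_contains_iff.mpr h, if_true]

lemma pvSet_add_of_not_mem {s : PySem.Set String} {k : String} (h : k ∉ s) :
    PySem.Set.add s k = s ++ [k] := by
  have hc : PySem.Set.contains s k = false := by
    cases hc : PySem.Set.contains s k
    · rfl
    · exact absurd (pvSet_contains_iff.mp hc) h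
  simp only [PySem.Set.add, hc, Bool.false_eq_true, if_false]

lemma pvFresh_congr (l : List String) : ∀ (s t : List String), (∀ x, x ∈ s ↔ x ∈ t) →
    pvFresh l s = pvFresh l t := by
  induction l with
  | nil => intro s t _; rfl
  | cons e l ih =>
    intro s t hst
    by_cases h : pvKeyOf e ∈ s
    · simp [pvFresh, h, (hst _).mp h, ih s t hst]
    · have h' : pvKeyOf e ∉ t := fun hx => h ((hst _).mpr hx)
      simp only [pvFresh, if_neg h, if_neg h']
      refine congrArg _ (ih _ _ ?_)
      intro x; simp [hst x]

lemma pvFresh_eq_foldl_add (l : List String) : ∀ (s : List String),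
    s ++ pvFresh l s = (l.map pvKeyOf).foldl PySem.Set.add s := by
  induction l with
  | nil => intro s; simp [pvFresh]
  | cons e l ih =>
    intro s
    by_cases h : pvKeyOf e ∈ s
    · simp only [pvFresh, if_pos h, List.map_cons, List.foldl_cons, pvSet_add_of_mem h]
      exact ih s
    · simp only [pvFresh, if_neg h, List.map_cons, List.foldl_cons, pvSet_add_of_not_mem h]
      rw [← ih (s ++ [pvKeyOf e])]
      simp

lemma pvFresh_nil_eq (l : List String) :
    pvFresh l [] = PySem.Set.ofList (l.map pvKeyOf) := by
  have := pvFresh_eq_foldl_add l []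
  simpa [PySem.Set.ofList_eq_foldl] using this

lemma pvOfList_append_singleton (xs : List String) (x : String) :
    PySem.Set.ofList (xs ++ [x]) = PySem.Set.add (PySem.Set.ofList xs) x := by
  simp [PySem.Set.ofList_eq_foldl, List.foldl_append]

-- A's grouping step equals a plain modify step
lemma pvA_step (d : PySem.Dict String (List String)) (k : String) (e : String) :
    (if d.contains k then d else d.insert k ([] : List String)).modify k []
        (fun g => g ++ [e])
      = d.modify k [] (fun g => g ++ [e]) := by
  by_cases h : d.contains k
  · simp [h]
  · simp only [Bool.not_eq_true] at h
    simp only [h, Bool.false_eq_true, if_false, PySem.Dict.modify, PySem.Dict.getD_insert_self,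
      PySem.Dict.insert_insert_self, PySem.Dict.getD_of_not_contains d ([] : List String) h]

-- counts lookup = length of the key's group
lemma pvCounts_getD (entries : List String) (k : String) :
    (entries.foldl (fun d entry =>
        d.insert (pvKeyOf entry) (d.getD (pvKeyOf entry) 0 + 1)) PySem.Dict.empty).getD k 0
      = ((entries.filter (fun e => pvKeyOf e == k)).length : Int) := by
  have h1 : (entries.foldl (fun (d : PySem.Dict String Int) entry =>
        d.insert (pvKeyOf entry) (d.getD (pvKeyOf entry) 0 + 1)) PySem.Dict.empty)
      = ((entries.map pvKeyOf).foldl (fun (d : PySem.Dict String Int) x =>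
          d.insert x (d.getD x 0 + 1)) PySem.Dict.empty) :=
    (List.foldl_map (f := pvKeyOf)
      (g := fun (d : PySem.Dict String Int) x => d.insert x (d.getD x 0 + 1))
      (l := entries) (init := PySem.Dict.empty)).symm
  rw [h1, PySem.Dict.getD_foldl_insert_add_one, List.count_eq_countP, List.countP_map]
  simp [Function.comp_def, List.countP_eq_length_filter]

-- B's second pass, characterised
lemma pvB_fold (all : List String) (cnt : PySem.Dict String Int)
    (hc : ∀ k, cnt.getD k 0 = ((all.filter (fun e => pvKeyOf e == k)).length : Int)) :
    ∀ (l pre acc : List String), all = pre ++ l →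
    (l.foldl (fun st entry =>
        if PySem.Set.contains st.2 (pvKeyOf entry) then st
        else
          (st.1 ++ [if cnt.getD (pvKeyOf entry) 0 = 1 then entry
                    else entry ++ " (+" ++ PySem.Int.toStr (cnt.getD (pvKeyOf entry) 0 - 1) ++ " similares)"],
           PySem.Set.add st.2 (pvKeyOf entry))) (acc, PySem.Set.ofList (pre.map pvKeyOf))).1
      = acc ++ (pvFresh l (pre.map pvKeyOf)).map (pvOut all) := by
  intro l
  induction l with
  | nil => intro pre acc _; simp [pvFresh]
  | cons e l ih =>
    intro pre acc hall
    have hmapapp : (pre ++ [e]).map pvKeyOf = pre.map pvKeyOf ++ [pvKeyOf e] := by simp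
    by_cases h : pvKeyOf e ∈ pre.map pvKeyOf
    · have hmem : pvKeyOf e ∈ PySem.Set.ofList (pre.map pvKeyOf) :=
        (PySem.Set.mem_ofList _ _).mpr h
      have hcont : PySem.Set.contains (PySem.Set.ofList (pre.map pvKeyOf)) (pvKeyOf e) = true :=
        pvSet_contains_iff.mpr hmem
      have hseen : PySem.Set.ofList ((pre ++ [e]).map pvKeyOf)
          = PySem.Set.ofList (pre.map pvKeyOf) := by
        rw [hmapapp, pvOfList_append_singleton, pvSet_add_of_mem hmem]
      have := ih (pre ++ [e]) acc (by simpa using hall)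
      rw [hseen] at this
      simp only [List.foldl_cons, hcont, if_true] at this ⊢
      rw [this, pvFresh, if_pos h,
        pvFresh_congr l ((pre ++ [e]).map pvKeyOf) (pre.map pvKeyOf ++ [pvKeyOf e])
          (by simp), pvFresh_congr l (pre.map pvKeyOf ++ [pvKeyOf e]) (pre.map pvKeyOf)
          (by
            intro x
            simp only [List.mem_append, List.mem_singleton]
            constructor
            · rintro (hx | hx)
              · exact hx
              · exact hx ▸ h
            · exact Or.inl)]
    · have hmem : pvKeyOf e ∉ PySem.Set.ofList (pre.map pvKeyOf) := fun hx =>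
        h ((PySem.Set.mem_ofList _ _).mp hx)
      have hcont : PySem.Set.contains (PySem.Set.ofList (pre.map pvKeyOf)) (pvKeyOf e) = false := by
        cases hx : PySem.Set.contains (PySem.Set.ofList (pre.map pvKeyOf)) (pvKeyOf e)
        · rfl
        · exact absurd (pvSet_contains_iff.mp hx) hmem
      have hgrp : all.filter (fun x => pvKeyOf x == pvKeyOf e)
          = e :: l.filter (fun x => pvKeyOf x == pvKeyOf e) := by
        rw [hall, List.filter_append]
        have hpre : pre.filter (fun x => pvKeyOf x == pvKeyOf e) = [] := by
          rw [List.filter_eq_nil_iff]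
          intro x hx
          simp only [beq_iff_eq]
          intro hk
          exact h (hk ▸ List.mem_map_of_mem hx)
        simp [hpre]
      have hval : (if cnt.getD (pvKeyOf e) 0 = 1 then e
          else e ++ " (+" ++ PySem.Int.toStr (cnt.getD (pvKeyOf e) 0 - 1) ++ " similares)")
          = pvOut all (pvKeyOf e) := by
        rw [hc, pvOut, pvRender]
        simp only [hgrp]
        have hlen : ((e :: l.filter (fun x => pvKeyOf x == pvKeyOf e)).length : Int) = 1
            ↔ (e :: l.filter (fun x => pvKeyOf x == pvKeyOf e)).length = 1 := by
          exact_mod_cast Iff.rfl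
        by_cases h1 : (e :: l.filter (fun x => pvKeyOf x == pvKeyOf e)).length = 1
        · simp [h1]
        · rw [if_neg (fun hx => h1 (hlen.mp hx)), if_neg h1]
          simp
      have hseen : PySem.Set.add (PySem.Set.ofList (pre.map pvKeyOf)) (pvKeyOf e)
          = PySem.Set.ofList ((pre ++ [e]).map pvKeyOf) := by
        rw [hmapapp, pvOfList_append_singleton, pvSet_add_of_not_mem hmem]
      have := ih (pre ++ [e]) (acc ++ [pvOut all (pvKeyOf e)]) (by simpa using hall)
      simp only [List.foldl_cons, hcont, Bool.false_eq_true, if_false, hval, hseen] at this ⊢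
      rw [this, pvFresh, if_neg h,
        pvFresh_congr l ((pre ++ [e]).map pvKeyOf) (pre.map pvKeyOf ++ [pvKeyOf e]) (by simp)]
      simp

-- A's whole computation, characterised
lemma pvA_eq (entries : List String) (h : ¬ entries.length ≤ 3) (threshold : Int) :
    compress_similar_entries entries threshold
      = (PySem.Set.ofList (entries.map pvKeyOf)).map (pvOut entries) := by
  simp only [compress_similar_entries, if_neg h]
  have hstep : entries.foldl (fun d entry =>
      (if d.contains (pvKeyOf entry) = true then d
       else d.insert (pvKeyOf entry) ([] : List String)).modify (pvKeyOf entry) []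
        (fun g => g ++ [entry])) PySem.Dict.empty
    = (entries.map (fun e => (pvKeyOf e, e))).foldl
        (fun d p => d.modify p.1 [] (fun g => g ++ [p.2])) PySem.Dict.empty := by
    rw [List.foldl_map]
    exact PySem.List.foldl_congr_mem _ _ _ _ (fun acc x _ => pvA_step acc (pvKeyOf x) x)

  simp only [hstep]
  set D := (entries.map (fun e => (pvKeyOf e, e))).foldl
      (fun d p => d.modify p.1 [] (fun g => g ++ [p.2])) PySem.Dict.empty with hD
  have hkeys : D.keys = PySem.Set.ofList (entries.map pvKeyOf) := by
    rw [hD, PySem.Dict.keys_foldl_modify_key (entries.map (fun e => (pvKeyOf e, e)))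
      (fun p => p.1) [] (fun _ (p : String × String) => (fun g => g ++ [p.2]))]
    simp only [List.map_map]
    have : PySem.Set.update (PySem.Dict.empty : PySem.Dict String (List String)).keys
        (entries.map ((fun p => p.1) ∘ (fun e => (pvKeyOf e, e))))
        = PySem.Set.ofList (entries.map pvKeyOf) := by
      simp [PySem.Set.update, PySem.Set.ofList_eq_foldl, PySem.Dict.keys_empty,
        Function.comp_def]
    exact this
  have hnd : D.keys.Nodup := by
    rw [hD]
    exact PySem.Dict.nodup_keys_foldl_modify_key _ (fun p => p.1) []
      (fun _ (p : String × String) => (fun g => g ++ [p.2])) _ (by simp)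
  have hgetD : ∀ k, D.getD k [] = entries.filter (fun e => pvKeyOf e == k) := by
    intro k
    rw [hD, PySem.Dict.getD_foldl_modify_append]
    rw [List.filter_map, List.map_map]
    simp [Function.comp_def]
  rw [PySem.Dict.items_eq_map_keys D hnd []]
  rw [PySem.List.foldl_congr_mem _ _
    (fun acc kg => acc ++ [pvRender kg]) _ (by
      intro acc x _
      simp only [pvRender]
      split_ifs <;> rfl)]
  rw [PySem.List.foldl_append_singleton_eq_map, List.map_map, hkeys]
  apply List.map_congr_left
  intro k _
  simp [pvOut, hgetD k]

-- ===== VERDICT (by name: the statement is the Claim_ definition above) =====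
theorem compress_similar_entries_spec : Claim_equal_compress_similar_entries := by
  intro entries threshold _dom
  unfold Spec_compress_similar_entries
  by_cases h : entries.length ≤ 3
  · simp [compress_similar_entries, compress_similar_entries_alt, h]
  · rw [pvA_eq entries h threshold]
    simp only [compress_similar_entries_alt, if_neg h]
    have hB := pvB_fold entries _ (pvCounts_getD entries) entries [] [] (by simp)
    simp only [List.map_nil] at hB
    rw [show PySem.Set.ofList ([] : List String) = (PySem.Set.empty : PySem.Set String) from rfl] at hB
    rw [hB, pvFresh_nil_eq]
    simp
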